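-- pv_equiv track=rewrite | github.com/MrHamdulay/csc3-capstone | examples/data/Assignment_4/urssin001/boxes.py | get_rectangle
-- ===== SOURCE A (Python) =====
-- def get_rectangle(width, height):
--     out=""
--     for i in range(1,height+1):
--             if i==1 or i ==height:
--                 out+='*'*width+"\n"
--             else:
--                 out+='*'+' '*(width-2)+'*'+"\n"
--     return out
-- ===== SOURCE B (Python) =====
-- def get_rectangle(width, height):
--     if height <= 0:
--         return ""
--     border = '*'*width + "\n"
--     if height == 1:
--         return border
--     middle = '*' + ' '*(width-2) + '*' + "\n"
--     return border + middle*(height-2) + border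
-- ===== Notes on version B (the rewrite author's own statement) =====
-- stated objective: simpler
-- what changed: Replaces the row-by-row loop with per-iteration branching by a closed-form construction: build the border and middle line strings once and return border + middle*(height-2) + border via string repetition.
import Mathlib
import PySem

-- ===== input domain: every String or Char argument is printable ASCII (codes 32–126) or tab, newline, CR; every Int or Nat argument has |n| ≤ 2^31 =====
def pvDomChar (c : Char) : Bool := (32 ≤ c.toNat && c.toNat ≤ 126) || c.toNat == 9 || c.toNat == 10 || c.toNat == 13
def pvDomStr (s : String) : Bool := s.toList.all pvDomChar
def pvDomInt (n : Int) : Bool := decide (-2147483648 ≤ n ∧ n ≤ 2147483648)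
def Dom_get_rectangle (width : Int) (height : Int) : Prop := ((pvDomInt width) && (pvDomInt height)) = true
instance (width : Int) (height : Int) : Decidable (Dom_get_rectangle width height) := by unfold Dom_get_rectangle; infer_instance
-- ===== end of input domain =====

-- B builds the border and middle lines once and returns the box in closed form
-- via string repetition, instead of A's row-by-row loop with per-row branching.

-- ===== PORT A =====
-- out = ""; for i in range(1, height+1): border row if i==1 or i==height else middle row
def get_rectangle (width : Int) (height : Int) : String :=
  String.ofList ((PySem.List.pyRange 1 (height + 1)).foldl
    (fun out i =>
      if i = 1 ∨ i = height then
        out ++ (PySem.List.pyRepeat ['*'] width ++ ['\n'])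
      else
        out ++ (['*'] ++ PySem.List.pyRepeat [' '] (width - 2) ++ ['*'] ++ ['\n'])) [])

-- ===== PORT B =====
def get_rectangle_alt (width : Int) (height : Int) : String :=
  if height ≤ 0 then "" else
  let border := PySem.List.pyRepeat ['*'] width ++ ['\n']
  if height = 1 then String.ofList border else
  let middle := ['*'] ++ PySem.List.pyRepeat [' '] (width - 2) ++ ['*'] ++ ['\n']
  String.ofList (border ++ PySem.List.pyRepeat middle (height - 2) ++ border)

-- ===== PRECONDITION & SPEC =====
def Spec_get_rectangle (width : Int) (height : Int) (out : String) : Prop := out = get_rectangle_alt width height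
instance (width : Int) (height : Int) (out : String) : Decidable (Spec_get_rectangle width height out) := by unfold Spec_get_rectangle; infer_instance

-- ===== CLAIM (what is proved, stated in full; the proofs are below) =====
def Claim_equal_get_rectangle : Prop := ∀ (width : Int) (height : Int), Dom_get_rectangle width height → Spec_get_rectangle width height (get_rectangle width height)

-- ===== LEMMAS AND PROOFS =====

-- folding a constant append over any list appends the block once per element
theorem foldl_const_append {α β : Type} (m : List α) (l : List β) (acc : List α) :
    l.foldl (fun out _ => out ++ m) acc = acc ++ (List.replicate l.length m).flatten := by
  induction l generalizing acc with
  | nil => simp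
  | cons x t ih => simp [List.foldl, ih, List.replicate_succ]

-- ===== VERDICT (by name: the statement is the Claim_ definition above) =====
theorem get_rectangle_spec : Claim_equal_get_rectangle := by
  intro width height _
  unfold Spec_get_rectangle get_rectangle get_rectangle_alt
  by_cases h0 : height ≤ 0
  · rw [PySem.List.pyRange_one_eq_nil (by omega)]
    simp [h0]
  · by_cases h1 : height = 1
    · subst h1
      rw [show PySem.List.pyRange (1:Int) (1+1) = [1] from PySem.List.pyRange_one_singleton 1]
      simp
    · -- height ≥ 2
      have h2 : 2 ≤ height := by omega
      rw [PySem.List.pyRange_one_append 1 2 (height + 1) (by omega) (by omega),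
          PySem.List.pyRange_one_append 2 height (height + 1) (by omega) (by omega),
          show PySem.List.pyRange (1:Int) 2 = [1] by
            rw [show (2:Int) = 1 + 1 by norm_num]; exact PySem.List.pyRange_one_singleton 1,
          PySem.List.pyRange_one_singleton height]
      simp only [List.foldl_append, List.foldl_cons, List.foldl_nil]
      simp only [true_or, or_true, if_true]
      have hmid :
          (PySem.List.pyRange 2 height).foldl
            (fun out i =>
              if i = 1 ∨ i = height then
                out ++ (PySem.List.pyRepeat ['*'] width ++ ['\n'])
              else
                out ++ (['*'] ++ PySem.List.pyRepeat [' '] (width - 2) ++ ['*'] ++ ['\n']))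
            ([] ++ (PySem.List.pyRepeat ['*'] width ++ ['\n']))
          = ([] ++ (PySem.List.pyRepeat ['*'] width ++ ['\n'])) ++
              (List.replicate (PySem.List.pyRange 2 height).length
                (['*'] ++ PySem.List.pyRepeat [' '] (width - 2) ++ ['*'] ++ ['\n'])).flatten := by
        rw [PySem.List.foldl_congr_mem _ _
          (fun out _ => out ++ (['*'] ++ PySem.List.pyRepeat [' '] (width - 2) ++ ['*'] ++ ['\n'])) _
          (by
            intro acc x hx
            have := (PySem.List.mem_pyRange_one).mp hx
            have hne : ¬ (x = 1 ∨ x = height) := by omega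
            simp [hne])]
        exact foldl_const_append _ _ _
      rw [hmid]
      simp [h0, h1, PySem.List.length_pyRange_one, PySem.List.pyRepeat, List.append_assoc]
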